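-- pv_equiv track=rewrite | github.com/marekzajac97/bf2-blender | core/bf2/bf2_engine/main_console.py | icase
-- ===== SOURCE A (Python) =====
-- import os, glob, string
--
-- def icase(item):
--     assert type(item) == str
--     out = ''
--     for x in item:
--         if x in string.ascii_letters:
--             out += '[%s%s]' % (x.upper(), x.lower())
--         else:
--             out += x
--     return out
-- ===== SOURCE B (Python) =====
-- import string
--
-- def icase(item):
--     assert type(item) == str
--     n = len(item)
--     if n <= 1:
--         if n == 1 and item in string.ascii_letters:
--             return '[' + item.upper() + item.lower() + ']'
--         return item
--     m = n // 2
--     return icase(item[:m]) + icase(item[m:])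
-- ===== Notes on version B (the rewrite author's own statement) =====
-- stated objective: alternative
-- what changed: B replaces A's linear left-to-right accumulator loop by divide-and-conquer recursion: split the string at the midpoint, recurse on each half, and concatenate, with a one-character base case; correct because the per-character output pieces concatenate associatively.
import Mathlib
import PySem

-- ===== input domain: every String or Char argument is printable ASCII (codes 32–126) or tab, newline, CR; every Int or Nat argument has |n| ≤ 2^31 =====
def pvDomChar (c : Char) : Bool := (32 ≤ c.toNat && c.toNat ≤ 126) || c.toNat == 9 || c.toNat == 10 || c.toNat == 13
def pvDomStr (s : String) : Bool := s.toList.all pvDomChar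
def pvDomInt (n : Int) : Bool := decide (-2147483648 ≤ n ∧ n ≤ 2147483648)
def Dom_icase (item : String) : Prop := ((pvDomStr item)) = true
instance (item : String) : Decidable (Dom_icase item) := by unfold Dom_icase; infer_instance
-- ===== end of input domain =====

set_option maxRecDepth 4096


-- B replaces A's linear accumulator loop by divide-and-conquer recursion on string halves
-- (one-character base case); only the return value is claimed equal.

-- ===== PORT A =====
-- string.ascii_letters
def pvLetters : List Char :=
  "abcdefghijklmnopqrstuvwxyzABCDEFGHIJKLMNOPQRSTUVWXYZ".toList

-- literal transliteration of A: character loop appending '[Uu]' for letters, the char otherwise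
def icase (item : String) : String :=
  String.mk (item.toList.foldl (fun out x =>
    if pvLetters.contains x then
      out ++ ['[', PySem.Chars.upperChar x, PySem.Chars.lowerChar x, ']']
    else
      out ++ [x]) [])

-- ===== PORT B =====
-- divide and conquer on the character list: item[:m] / item[m:] with m = n // 2
def pvDC (l : List Char) : List Char :=
  if h : l.length ≤ 1 then
    match l with
    | [] => []
    | c :: _ =>
        if pvLetters.contains c then ['[', PySem.Chars.upperChar c, PySem.Chars.lowerChar c, ']']
        else [c]
  else
    pvDC (PySem.List.slice l none (some ((l.length / 2 : Nat) : Int))) ++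
    pvDC (PySem.List.slice l (some ((l.length / 2 : Nat) : Int)) none)
termination_by l.length
decreasing_by
  · simp only [PySem.List.slice_to_natCast, List.length_take]
    omega
  · simp only [PySem.List.slice_from_natCast, List.length_drop]
    omega

def icase_alt (item : String) : String := String.mk (pvDC item.toList)

-- ===== PRECONDITION & SPEC =====
def Spec_icase (item : String) (out : String) : Prop := out = icase_alt item
instance (item : String) (out : String) : Decidable (Spec_icase item out) := by unfold Spec_icase; infer_instance

-- ===== CLAIM (what is proved, stated in full; the proofs are below) =====
def Claim_equal_icase : Prop := ∀ (item : String), Dom_icase item → Spec_icase item (icase item)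

-- ===== LEMMAS AND PROOFS =====

-- the common per-character piece both programs emit
def pvStep (c : Char) : List Char :=
  if pvLetters.contains c then ['[', PySem.Chars.upperChar c, PySem.Chars.lowerChar c, ']']
  else [c]

-- A's fold appends pvStep pieces left to right
theorem pv_foldl_eq (l : List Char) (acc : List Char) :
    l.foldl (fun out x =>
      if pvLetters.contains x then
        out ++ ['[', PySem.Chars.upperChar x, PySem.Chars.lowerChar x, ']']
      else out ++ [x]) acc
      = acc ++ l.flatMap pvStep := by
  induction l generalizing acc with
  | nil => simp
  | cons x xs ih =>
      simp only [List.foldl_cons, List.flatMap_cons, ih, pvStep]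
      split_ifs <;> simp

-- B's divide-and-conquer produces the same concatenation of pvStep pieces
theorem pv_pvDC_eq : ∀ (n : Nat) (l : List Char), l.length ≤ n → pvDC l = l.flatMap pvStep := by
  intro n
  induction n with
  | zero =>
      intro l h
      have hl : l = [] := by cases l <;> simp_all
      subst hl
      rw [pvDC]
      rfl
  | succ n ih =>
      intro l h
      rw [pvDC]
      by_cases h1 : l.length ≤ 1
      · rw [dif_pos h1]
        match l, h1 with
        | [], _ => rfl
        | [c], _ => simp [pvStep]
      · rw [dif_neg h1]
        rw [PySem.List.slice_to_natCast, PySem.List.slice_from_natCast]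
        rw [ih _ (by simp [List.length_take]; omega),
            ih _ (by simp [List.length_drop]; omega)]
        rw [← List.flatMap_append, List.take_append_drop]

-- ===== VERDICT (by name: the statement is the Claim_ definition above) =====
theorem icase_spec : Claim_equal_icase := by
  intro item _
  unfold Spec_icase icase icase_alt
  rw [pv_foldl_eq, pv_pvDC_eq item.toList.length item.toList le_rfl]
  simp
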